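-- pv_equiv track=rewrite | github.com/chojaelong/CodingTest | code/프로그래머스/미로탈출.py | solution
-- ===== SOURCE A (Python) =====
-- from collections import deque
--
-- def solution(maps):
--     array = [list(i) for i in maps]
--     visited = [[False for _ in range(len(array[0]))] for _ in range(len(array))]
--     s = find(array, 'S')
--     l = find(array, 'L')
--     e = find(array, 'E')
--
--     m = bfs(s, l, 0, array, visited)
--     if m == -1:
--         return m
--     visited = [[False for _ in range(len(array[0]))] for _ in range(len(array))]
--     answer = bfs(l, e, m, array, visited)
--
--     return answer
--
-- def find(array, word):
--     for i in range(len(array)):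
--         for j in range(len(array[i])):
--             if array[i][j] == word:
--                 return (i, j)
--
-- def bfs(now, target, move, array, visited):
--     q = deque([now])
--     array[now[0]][now[1]] = move
--     visited[now[0]][now[1]] = True
--     dx = [0, 0, 1, -1]
--     dy = [1, -1, 0, 0]
--
--     while(q):
--         x, y = q.popleft()
--
--         if (x, y) == target:
--             return array[x][y]
--
--         for i in range(4):
--             nx = x + dx[i]
--             ny = y + dy[i]
--
--             if (0 <= nx < len(array)) and (0 <= ny < len(array[0])) and (array[nx][ny] != 'X') and (not visited[nx][ny]):
--                 array[nx][ny] = array[x][y] + 1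
--                 visited[nx][ny] = True
--                 q.append((nx, ny))
--
--     return -1
-- ===== SOURCE B (Python) =====
-- # B: level-synchronous BFS -- expand a whole frontier set per step and count levels;
-- # a pure dist(start, goal, grid) called twice and summed (no queue, no grid mutation,
-- # no per-node distance bookkeeping).
-- def solution(maps):
--     grid = [list(r) for r in maps]
--     s = find(grid, 'S')
--     l = find(grid, 'L')
--     d1 = dist(s, l, grid)
--     if d1 == -1:
--         return -1
--     d2 = dist(l, find(grid, 'E'), grid)
--     if d2 == -1:
--         return -1
--     return d1 + d2
--
-- def find(grid, ch):
--     return next(((i, j) for i, row in enumerate(grid)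
--                  for j, c in enumerate(row) if c == ch), None)
--
-- def dist(start, goal, grid):
--     rows, cols = len(grid), len(grid[0])
--     visited = [[False] * cols for _ in range(rows)]
--     visited[start[0]][start[1]] = True
--     frontier = [start]
--     d = 0
--     while frontier:
--         if goal in frontier:
--             return d
--         nxt = []
--         for x, y in frontier:
--             for nx, ny in ((x, y + 1), (x, y - 1), (x + 1, y), (x - 1, y)):
--                 if 0 <= nx < rows and 0 <= ny < cols and grid[nx][ny] != 'X' and not visited[nx][ny]:
--                     visited[nx][ny] = True
--                     nxt.append((nx, ny))
--         frontier = nxt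
--         d += 1
--     return -1
-- ===== Notes on version B (the rewrite author's own statement) =====
-- stated objective: alternative
-- what changed: B replaces A's FIFO-queue BFS that mutates grid cells into distances and threads the S-to-L distance as an offset into the second search by a level-synchronous BFS: a pure dist(start, goal, grid) helper that expands a whole frontier list per iteration and counts levels with a single counter (no queue, no per-node distance, no grid mutation), called twice and summed.
-- outside the precondition, e.g. on solution(['S', 'LE']): A returns -1, B returns -1; on solution(['SX', 'LX', 'E']): A returns 2, B returns 2
import Mathlib
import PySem

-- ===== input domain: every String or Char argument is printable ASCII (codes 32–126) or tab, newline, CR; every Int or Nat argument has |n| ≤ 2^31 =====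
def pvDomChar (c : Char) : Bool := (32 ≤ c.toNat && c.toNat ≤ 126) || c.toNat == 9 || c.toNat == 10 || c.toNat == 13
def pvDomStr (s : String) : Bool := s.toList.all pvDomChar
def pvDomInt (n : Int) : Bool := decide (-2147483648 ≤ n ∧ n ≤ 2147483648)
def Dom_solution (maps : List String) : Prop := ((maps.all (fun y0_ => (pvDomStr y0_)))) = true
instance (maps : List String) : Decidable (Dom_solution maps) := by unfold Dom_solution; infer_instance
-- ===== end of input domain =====

-- B replaces A's FIFO-queue BFS — which overwrites grid cells with distances and threads the
-- S→L distance as an offset into the second search — by a level-synchronous BFS: a pure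
-- dist(start, goal) helper that expands a whole frontier list per iteration and counts
-- levels, called twice and summed (objective: alternative).  A mutates its cell grid in
-- place in Python; the equivalence proved here is about the return value only.

-- ===== PORT A =====

-- A's grid cells hold either the original character or an int distance written by bfs.
inductive PCell where
  | ch (c : Char)
  | num (n : Int)
deriving DecidableEq, Repr

-- shared 2-d indexing helpers (Python's array[i][j] read / write, nonnegative indices)
def get2 {α : Type} (g : List (List α)) (i j : Int) : Option α :=
  if 0 ≤ i ∧ 0 ≤ j then (g[i.toNat]?.bind fun row => row[j.toNat]?) else none

def set2 {α : Type} (g : List (List α)) (i j : Int) (v : α) : List (List α) :=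
  if 0 ≤ i ∧ 0 ≤ j then g.set i.toNat ((g[i.toNat]?.getD []).set j.toNat v) else g

-- array[x][y] as an int; the catch-all arm is where Python would raise TypeError —
-- unreachable from solution's calls (queue cells are always nums)
def cellVal : Option PCell → Int
  | some (.num n) => n
  | _ => 0

-- A's find: nested index loops, first match
def findRowA : List PCell → PCell → Nat → Option Nat
  | [], _, _ => none
  | c :: cs, w, j => if c = w then some j else findRowA cs w (j + 1)

def findA : List (List PCell) → PCell → Nat → Option (Int × Int)
  | [], _, _ => none
  | row :: rs, w, i =>
    match findRowA row w 0 with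
    | some j => some ((i : Int), (j : Int))
    | none => findA rs w (i + 1)

-- dx/dy pairs of A, in loop order
def dirsA : List (Int × Int) := [(0, 1), (0, -1), (1, 0), (-1, 0)]

-- one direction of A's inner for-loop: state is (array, visited, queue)
def stepA (R C x y : Int) (s : List (List PCell) × List (List Bool) × List (Int × Int))
    (d : Int × Int) : List (List PCell) × List (List Bool) × List (Int × Int) :=
  let nx := x + d.1
  let ny := y + d.2
  if 0 ≤ nx ∧ nx < R ∧ 0 ≤ ny ∧ ny < C ∧ get2 s.1 nx ny ≠ some (PCell.ch 'X') ∧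
      get2 s.2.1 nx ny ≠ some true then
    (set2 s.1 nx ny (PCell.num (cellVal (get2 s.1 x y) + 1)), set2 s.2.1 nx ny true,
      s.2.2 ++ [(nx, ny)])
  else s

-- A's while loop (fuel = R*C+1 pops suffices: each cell is enqueued at most once);
-- R = len(array), C = len(array[0]) are constant through the loop, so passed as parameters;
-- returns the result together with the mutated array (observed by the second bfs call)
def bfsLoopA (target : Option (Int × Int)) (R C : Int) :
    Nat → List (Int × Int) → List (List PCell) → List (List Bool) → Int × List (List PCell)
  | 0, _, g, _ => (-1, g)
  | _ + 1, [], g, _ => (-1, g)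
  | fuel + 1, (x, y) :: rest, g, vis =>
    if some (x, y) = target then (cellVal (get2 g x y), g)
    else
      let s := dirsA.foldl (stepA R C x y) (g, vis, rest)
      bfsLoopA target R C fuel s.2.2 s.1 s.2.1

def bfsA (now : Int × Int) (target : Option (Int × Int)) (move : Int)
    (array : List (List PCell)) (visited : List (List Bool)) : Int × List (List PCell) :=
  bfsLoopA target (array.length : Int) ((array.headI).length : Int)
    (array.length * (array.headI).length + 1) [now]
    (set2 array now.1 now.2 (PCell.num move)) (set2 visited now.1 now.2 true)

def solution (maps : List String) : Int :=
  let array := maps.map (fun s => s.toList.map PCell.ch)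
  let visited := List.replicate array.length (List.replicate (array.headI).length false)
  match findA array (PCell.ch 'S') 0 with
  | none => 0   -- Python raises TypeError here (s is None); excluded by Pre_solution
  | some s =>
    let l := findA array (PCell.ch 'L') 0
    let e := findA array (PCell.ch 'E') 0
    let r1 := bfsA s l 0 array visited
    if r1.1 = -1 then r1.1
    else
      match l with
      | none => -1   -- dead arm: r1.1 ≠ -1 forces l = some (Python never reaches this)
      | some lp =>
        let visited2 := List.replicate array.length (List.replicate (array.headI).length false)
        (bfsA lp e r1.1 r1.2 visited2).1

-- ===== PORT B =====

-- B's find: first (i, j) of the enumerate-generator with a matching char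
def findB (grid : List (List Char)) (c : Char) : Option (Int × Int) :=
  (PySem.List.enumerate grid 0).findSome? fun p =>
    (PySem.List.enumerate p.2 0).findSome? fun q =>
      if q.2 = c then some (p.1, q.1) else none

-- the four neighbour positions of Source B's inner tuple, in order
def nbrsB (p : Int × Int) : List (Int × Int) :=
  [(p.1, p.2 + 1), (p.1, p.2 - 1), (p.1 + 1, p.2), (p.1 - 1, p.2)]

-- one neighbour test of Source B: state is (visited, next frontier); the grid is read-only
def stepB (grid : List (List Char)) (R C : Int)
    (s : List (List Bool) × List (Int × Int)) (pos : Int × Int) :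
    List (List Bool) × List (Int × Int) :=
  if 0 ≤ pos.1 ∧ pos.1 < R ∧ 0 ≤ pos.2 ∧ pos.2 < C ∧ get2 grid pos.1 pos.2 ≠ some 'X' ∧
      get2 s.1 pos.1 pos.2 ≠ some true then
    (set2 s.1 pos.1 pos.2 true, s.2 ++ [pos])
  else s

-- expanding one frontier cell: Source B's inner for-loop
def expandB (grid : List (List Char)) (R C : Int)
    (s : List (List Bool) × List (Int × Int)) (p : Int × Int) :
    List (List Bool) × List (Int × Int) :=
  (nbrsB p).foldl (stepB grid R C) s

-- Source B's 'goal in frontier' (goal may be None: then never a member)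
def goalIn (goal : Option (Int × Int)) (f : List (Int × Int)) : Bool :=
  match goal with
  | some gp => f.contains gp
  | none => false

-- Source B's while loop: one iteration per LEVEL (fuel R*C+1 levels suffices: every
-- nonempty level newly visits at least one cell)
def levelLoopB (grid : List (List Char)) (goal : Option (Int × Int)) (R C : Int) :
    Nat → Int → List (Int × Int) → List (List Bool) → Int
  | 0, _, _, _ => -1
  | _ + 1, _, [], _ => -1
  | fuel + 1, d, f, vis =>
    if goalIn goal f then d
    else
      let s := f.foldl (expandB grid R C) (vis, [])
      levelLoopB grid goal R C fuel (d + 1) s.2 s.1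

def distB (start : Int × Int) (goal : Option (Int × Int)) (grid : List (List Char)) : Int :=
  levelLoopB grid goal (grid.length : Int) ((grid.headI).length : Int)
    (grid.length * (grid.headI).length + 1) 0 [start]
    (set2 (List.replicate grid.length (List.replicate (grid.headI).length false))
      start.1 start.2 true)

def solution_alt (maps : List String) : Int :=
  let grid := maps.map (fun s => s.toList)
  match findB grid 'S' with
  | none => 0   -- Source B raises TypeError here too (start is None); excluded by Pre_solution
  | some s =>
    let l := findB grid 'L'
    let d1 := distB s l grid
    if d1 = -1 then -1
    else
      match l with
      | none => -1   -- dead arm: d1 ≠ -1 forces l = some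
      | some lp =>
        let d2 := distB lp (findB grid 'E') grid
        if d2 = -1 then -1 else d1 + d2

-- ===== PRECONDITION & SPEC =====
-- Pre_ restricts to the maze problem's natural domain: rectangular grids (all rows the length
-- of the first) containing 'S'.  When 'S' is missing, A raises TypeError; on ragged grids A's
-- neighbour check array[nx][ny] usually raises IndexError (on the rare ragged grids where A
-- still returns, B returns the same value — see the cited examples).
def Pre_solution (maps : List String) : Prop :=
  (∀ r ∈ maps, r.toList.length = (maps.headI).toList.length) ∧ (∃ r ∈ maps, 'S' ∈ r.toList)

instance (maps : List String) : Decidable (Pre_solution maps) := by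
  unfold Pre_solution; infer_instance

def pvWitness_solution : List String := ["SOL", "XXE"]

def Spec_solution (maps : List String) (out : Int) : Prop := out = solution_alt maps
instance (maps : List String) (out : Int) : Decidable (Spec_solution maps out) := by
  unfold Spec_solution; infer_instance

-- ===== CLAIM (what is proved, stated in full; the proofs are below) =====
def Claim_equal_solution : Prop :=
  ∀ (maps : List String), Dom_solution maps → Pre_solution maps →
    Spec_solution maps (solution maps)

-- ===== LEMMAS AND PROOFS =====

-- shape: two grids with the same row lengths
def shapeEq {α β : Type} (g : List (List α)) (o : List (List β)) : Prop :=
  g.map List.length = o.map List.length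

def rectGrid (o : List (List Char)) (C : Int) : Prop := ∀ row ∈ o, (row.length : Int) = C

-- A's mutated grid has 'X' exactly where the char grid has 'X'
def xAgree (g : List (List PCell)) (o : List (List Char)) : Prop :=
  ∀ i j : Int, (get2 g i j = some (PCell.ch 'X') ↔ get2 o i j = some 'X')

-- number of still-unvisited cells: the fuel measure shared by both loops
def cntF (vis : List (List Bool)) : Nat := (vis.map (fun r => r.count false)).sum

-- frontier/queue property: every listed cell carries distance value v and is visited
def FrProp (g : List (List PCell)) (vis : List (List Bool)) (v : Int)
    (f : List (Int × Int)) : Prop :=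
  ∀ p ∈ f, get2 g p.1 p.2 = some (PCell.num v) ∧ get2 vis p.1 p.2 = some true

-- A's per-pop expansion of one frontier cell (proof-side regrouping of A's inner fold)
def expandA (R C : Int) (s : List (List PCell) × List (List Bool) × List (Int × Int))
    (p : Int × Int) : List (List PCell) × List (List Bool) × List (Int × Int) :=
  dirsA.foldl (stepA R C p.1 p.2) s

-- joint invariant of the two frontier-expansion folds, relative to the level's initial
-- grid g0 / visited vis0 and initial next-queue length n0; v = distance of the NEXT level
def StI (o : List (List Char)) (v : Int) (g0 : List (List PCell)) (vis0 : List (List Bool))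
    (n0 : Nat) (sA : List (List PCell) × List (List Bool) × List (Int × Int))
    (sB : List (List Bool) × List (Int × Int)) : Prop :=
  sA.2.1 = sB.1 ∧ sA.2.2 = sB.2 ∧ shapeEq sA.1 o ∧ shapeEq sA.2.1 o ∧ xAgree sA.1 o ∧
  FrProp sA.1 sA.2.1 v sA.2.2 ∧
  cntF sA.2.1 + sA.2.2.length = cntF vis0 + n0 ∧
  (∀ i j : Int, get2 vis0 i j = some true →
    get2 sA.2.1 i j = some true ∧ get2 sA.1 i j = get2 g0 i j)

theorem shapeEq_length {α β : Type} {g : List (List α)} {o : List (List β)}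
    (h : shapeEq g o) : g.length = o.length := by
  have := congrArg List.length h
  simpa using this

theorem shapeEq_row {α β : Type} {g : List (List α)} {o : List (List β)}
    (h : shapeEq g o) (n : Nat) : g[n]?.map List.length = o[n]?.map List.length := by
  have := congrArg (fun l => l[n]?) h
  simpa using this

theorem shapeEq_headI {α β : Type} {g : List (List α)} {o : List (List β)}
    (h : shapeEq g o) : (g.headI).length = (o.headI).length := by
  cases g with
  | nil =>
    cases o with
    | nil => rfl
    | cons b bs => simp [shapeEq] at h
  | cons a as =>
    cases o with
    | nil => simp [shapeEq] at h
    | cons b bs =>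
      simp only [shapeEq, List.map_cons, List.cons.injEq] at h
      exact h.1

theorem shapeEq_set2 {α β : Type} {g : List (List α)} {o : List (List β)}
    (h : shapeEq g o) (i j : Int) (v : α) : shapeEq (set2 g i j v) o := by
  unfold shapeEq set2
  split
  · rw [List.map_set]
    apply List.ext_getElem?
    intro m
    rw [List.getElem?_set]
    by_cases hm : i.toNat = m
    · subst hm
      rw [if_pos rfl]
      by_cases hlt : i.toNat < (List.map List.length g).length
      · rw [if_pos hlt]
        simp only [List.length_map] at hlt
        have hg : g[i.toNat]? = some g[i.toNat] := List.getElem?_eq_getElem hlt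
        have hrow := shapeEq_row h i.toNat
        rw [hg] at hrow
        rw [List.getElem?_map]
        cases ho : o[i.toNat]? with
        | none => rw [ho] at hrow; simp at hrow
        | some orow =>
          rw [ho] at hrow
          simp only [Option.map_some, Option.some.injEq] at hrow
          simp [hg, hrow]
      · rw [if_neg hlt]
        simp only [List.length_map] at hlt
        have hlen := shapeEq_length h
        symm
        rw [List.getElem?_eq_none_iff]
        simp only [List.length_map]
        omega
    · rw [if_neg hm, h]
  · exact h

theorem shapeEq_replicate (o : List (List Char)) (Cn : Nat)
    (h : ∀ row ∈ o, row.length = Cn) :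
    shapeEq (List.replicate o.length (List.replicate Cn false)) o := by
  unfold shapeEq
  rw [List.map_replicate]
  simp only [List.length_replicate]
  symm
  rw [List.eq_replicate_iff]
  constructor
  · simp
  · intro b hb
    rw [List.mem_map] at hb
    obtain ⟨row, hrow, rfl⟩ := hb
    exact h row hrow

theorem get2_set2_self {α : Type} {g : List (List α)} {i j : Int} {w : α} (v : α)
    (h : get2 g i j = some w) : get2 (set2 g i j v) i j = some v := by
  unfold get2 set2 at *
  by_cases hij : 0 ≤ i ∧ 0 ≤ j
  · simp only [if_pos hij] at h ⊢
    cases hrow : g[i.toNat]? with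
    | none => rw [hrow] at h; simp at h
    | some row =>
      rw [hrow] at h
      simp only [Option.bind_some] at h
      have hjlt : j.toNat < row.length := by
        by_contra hc
        rw [List.getElem?_eq_none_iff.mpr (Nat.le_of_not_lt hc)] at h
        simp at h
      have hilt : i.toNat < g.length := by
        by_contra hc
        rw [List.getElem?_eq_none_iff.mpr (Nat.le_of_not_lt hc)] at hrow
        simp at hrow
      simp only [Option.getD_some]
      rw [List.getElem?_set]
      simp [hilt, hjlt]
  · rw [if_neg hij] at h
    simp at h

theorem get2_set2_ne {α : Type} (g : List (List α)) (i j i' j' : Int) (v : α)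
    (h : ¬(i = i' ∧ j = j')) : get2 (set2 g i j v) i' j' = get2 g i' j' := by
  unfold get2 set2
  by_cases h1 : 0 ≤ i ∧ 0 ≤ j
  · simp only [if_pos h1]
    by_cases h2 : 0 ≤ i' ∧ 0 ≤ j'
    · simp only [if_pos h2]
      by_cases hii : i = i'
      · subst hii
        have hjj : j.toNat ≠ j'.toNat := by omega
        by_cases hlt : i.toNat < g.length
        · have hg : g[i.toNat]? = some g[i.toNat] := List.getElem?_eq_getElem hlt
          rw [List.getElem?_set]
          simp only [hlt, hg, Option.getD_some, Option.bind_some]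
          simp [List.getElem?_set_ne hjj]
        · have hg : g[i.toNat]? = none := List.getElem?_eq_none_iff.mpr (Nat.le_of_not_lt hlt)
          rw [List.getElem?_set]
          simp [hlt]
      · have hne : i.toNat ≠ i'.toNat := by omega
        rw [List.getElem?_set_ne hne]
    · simp [h2]
  · simp [h1]

theorem get2_set2_true {vis : List (List Bool)} {i j i' j' : Int}
    (h : get2 vis i' j' = some true) : get2 (set2 vis i j true) i' j' = some true := by
  by_cases hij : i = i' ∧ j = j'
  · obtain ⟨rfl, rfl⟩ := hij
    exact get2_set2_self true h
  · rw [get2_set2_ne vis i j i' j' true hij]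
    exact h

theorem get2_map {α β : Type} (f : α → β) (o : List (List α)) (i j : Int) :
    get2 (o.map (List.map f)) i j = (get2 o i j).map f := by
  unfold get2
  split
  · rw [List.getElem?_map]
    cases h : o[i.toNat]? with
    | none => simp
    | some row => simp [List.getElem?_map]
  · rfl

theorem get2_isSome_of {α : Type} {g : List (List α)} {o : List (List Char)} {C i j : Int}
    (hs : shapeEq g o) (hC : rectGrid o C) (h1 : 0 ≤ i) (h2 : i < (o.length : Int))
    (h3 : 0 ≤ j) (h4 : j < C) : ∃ w, get2 g i j = some w := by
  have hlen : g.length = o.length := shapeEq_length hs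
  have hi : i.toNat < o.length := by omega
  have hig : i.toNat < g.length := by omega
  have hrow : g[i.toNat]? = some g[i.toNat] := List.getElem?_eq_getElem hig
  have horow : o[i.toNat]? = some o[i.toNat] := List.getElem?_eq_getElem hi
  have hrl : (g[i.toNat]).length = (o[i.toNat]).length := by
    have := shapeEq_row hs i.toNat
    rw [hrow, horow] at this
    simpa using this
  have hoC : ((o[i.toNat]).length : Int) = C := hC _ (List.getElem_mem hi)
  have hj : j.toNat < (g[i.toNat]).length := by omega
  refine ⟨(g[i.toNat])[j.toNat], ?_⟩
  unfold get2
  rw [if_pos ⟨h1, h3⟩, hrow]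
  simp [List.getElem?_eq_getElem hj]

theorem bounds_of_get2_some {α : Type} {g : List (List α)} {o : List (List Char)}
    {C i j : Int} {w : α} (h : get2 g i j = some w) (hs : shapeEq g o) (hC : rectGrid o C) :
    0 ≤ i ∧ i < (o.length : Int) ∧ 0 ≤ j ∧ j < C := by
  unfold get2 at h
  split at h
  · rename_i hij
    cases hrow : g[i.toNat]? with
    | none => rw [hrow] at h; simp at h
    | some row =>
      rw [hrow] at h
      simp only [Option.bind_some] at h
      have hjlt : j.toNat < row.length := by
        by_contra hc
        rw [List.getElem?_eq_none_iff.mpr (Nat.le_of_not_lt hc)] at h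
        simp at h
      have hilt : i.toNat < g.length := by
        by_contra hc
        rw [List.getElem?_eq_none_iff.mpr (Nat.le_of_not_lt hc)] at hrow
        simp at hrow
      have hlen : g.length = o.length := shapeEq_length hs
      have hio : i.toNat < o.length := by omega
      have horow : o[i.toNat]? = some o[i.toNat] := List.getElem?_eq_getElem hio
      have hrl : row.length = (o[i.toNat]).length := by
        have := shapeEq_row hs i.toNat
        rw [hrow, horow] at this
        simpa using this
      have hoC : ((o[i.toNat]).length : Int) = C := hC _ (List.getElem_mem hio)
      refine ⟨hij.1, by omega, hij.2, by omega⟩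
  · simp at h

theorem xAgree_base (o : List (List Char)) : xAgree (o.map (List.map PCell.ch)) o := by
  intro i j
  rw [get2_map]
  cases get2 o i j <;> simp [PCell.ch.injEq]

theorem xAgree_set2_num {g : List (List PCell)} {o : List (List Char)} {i j : Int} {c : Char}
    (n : Int) (h : xAgree g o) (hw : ∃ w, get2 g i j = some w)
    (ho : get2 o i j = some c) (hc : c ≠ 'X') : xAgree (set2 g i j (PCell.num n)) o := by
  intro i' j'
  by_cases hij : i = i' ∧ j = j'
  · obtain ⟨rfl, rfl⟩ := hij
    obtain ⟨w, hw⟩ := hw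
    rw [get2_set2_self (PCell.num n) hw, ho]
    simp [hc]
  · rw [get2_set2_ne g i j i' j' (PCell.num n) hij]
    exact h i' j'

theorem findRowA_eq (c : Char) (ii : Int) :
    ∀ (row : List Char) (j : Nat),
    (PySem.List.enumerate row (j : Int)).findSome?
        (fun q => if q.2 = c then some (ii, q.1) else none)
      = (findRowA (row.map PCell.ch) (PCell.ch c) j).map (fun jn => (ii, (jn : Int))) := by
  intro row
  induction row with
  | nil => intro j; simp [PySem.List.enumerate_nil, findRowA]
  | cons a as ih =>
    intro j
    rw [PySem.List.enumerate_cons]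
    rw [List.findSome?_cons]
    by_cases ha : a = c
    · simp [ha, findRowA]
    · simp only [findRowA, List.map_cons]
      have hne : PCell.ch a ≠ PCell.ch c := by simp [ha]
      rw [if_neg (by simp [ha]), if_neg hne]
      have : ((j : Int) + 1) = (((j + 1 : Nat)) : Int) := by push_cast; ring
      rw [this, ih (j + 1)]

theorem findA_eq (c : Char) :
    ∀ (rows : List (List Char)) (i : Nat),
    (PySem.List.enumerate rows (i : Int)).findSome? (fun p =>
        (PySem.List.enumerate p.2 0).findSome? fun q =>
          if q.2 = c then some (p.1, q.1) else none)
      = findA (rows.map (List.map PCell.ch)) (PCell.ch c) i := by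
  intro rows
  induction rows with
  | nil => intro i; simp [PySem.List.enumerate_nil, findA]
  | cons row rs ih =>
    intro i
    rw [PySem.List.enumerate_cons, List.findSome?_cons]
    dsimp only
    have hrow := findRowA_eq c (i : Int) row 0
    rw [Nat.cast_zero] at hrow
    rw [hrow]
    cases hr : findRowA (row.map PCell.ch) (PCell.ch c) 0 with
    | some j => simp [findA, hr]
    | none =>
      have hcast : ((i : Int) + 1) = (((i + 1 : Nat)) : Int) := by push_cast; ring
      rw [hcast, ih (i + 1)]
      simp [findA, hr]

theorem findB_eq (o : List (List Char)) (c : Char) :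
    findB o c = findA (o.map (List.map PCell.ch)) (PCell.ch c) 0 := by
  unfold findB
  have h := findA_eq c o 0
  rw [Nat.cast_zero] at h
  exact h

theorem findRowA_sound {w : PCell} : ∀ (row : List PCell) (j0 j : Nat),
    findRowA row w j0 = some j → ∃ k : Nat, j = j0 + k ∧ row[k]? = some w := by
  intro row
  induction row with
  | nil => intro j0 j h; simp [findRowA] at h
  | cons a as ih =>
    intro j0 j h
    by_cases ha : a = w
    · simp [findRowA, ha] at h
      exact ⟨0, by omega, by simp [ha]⟩
    · rw [findRowA, if_neg ha] at h
      obtain ⟨k, hk1, hk2⟩ := ih (j0 + 1) j h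
      exact ⟨k + 1, by omega, by simpa using hk2⟩

theorem findA_sound {w : PCell} {p : Int × Int} (rows : List (List PCell))
    (h : findA rows w 0 = some p) : get2 rows p.1 p.2 = some w := by
  suffices haux : ∀ (rows : List (List PCell)) (i0 : Nat) (p : Int × Int),
      findA rows w i0 = some p → ∃ k jj : Nat,
        p = (((i0 + k : Nat) : Int), ((jj : Nat) : Int)) ∧
          (rows[k]?.bind fun row => row[jj]?) = some w by
    obtain ⟨k, jj, hp, hg⟩ := haux rows 0 p h
    subst hp
    unfold get2
    rw [if_pos ⟨by positivity, by positivity⟩]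
    simpa using hg
  intro rows
  induction rows with
  | nil => intro i0 p h; simp [findA] at h
  | cons row rs ih =>
    intro i0 p h
    rw [findA] at h
    cases hr : findRowA row w 0 with
    | some j =>
      rw [hr] at h
      simp only at h
      obtain ⟨k, hk1, hk2⟩ := findRowA_sound row 0 j hr
      have hp : ((i0 : Int), (j : Int)) = p := by simpa using h
      refine ⟨0, j, ?_, ?_⟩
      · rw [← hp]
        norm_num
      · have hjk : j = k := by omega
        simp [hjk, hk2]
    | none =>
      rw [hr] at h
      obtain ⟨k, jj, hp, hg⟩ := ih (i0 + 1) p h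
      refine ⟨k + 1, jj, ?_, by simpa using hg⟩
      rw [hp]
      congr 1
      push_cast
      ring



theorem rowSet_le : ∀ (r : List Bool) (m : Nat),
    (r.set m true).count false ≤ r.count false := by
  intro r
  induction r with
  | nil => intro m; simp
  | cons a as ih =>
    intro m
    cases m with
    | zero => cases a <;> simp
    | succ m =>
      simp only [List.set_cons_succ, List.count_cons]
      have := ih m
      omega

theorem rowSet_eq : ∀ (r : List Bool) (m : Nat), r[m]? = some false →
    (r.set m true).count false + 1 = r.count false := by
  intro r
  induction r with
  | nil => intro m h; simp at h
  | cons a as ih =>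
    intro m h
    cases m with
    | zero =>
      simp only [List.getElem?_cons_zero, Option.some.injEq] at h
      subst h
      simp
    | succ m =>
      simp only [List.getElem?_cons_succ] at h
      simp only [List.set_cons_succ, List.count_cons]
      have := ih m h
      omega

theorem cntF_set : ∀ (vis : List (List Bool)) (k : Nat) (row row' : List Bool),
    vis[k]? = some row →
    cntF (vis.set k row') + row.count false = cntF vis + row'.count false := by
  intro vis
  induction vis with
  | nil => intro k row row' h; simp at h
  | cons r rs ih =>
    intro k row row' h
    cases k with
    | zero =>
      simp only [List.getElem?_cons_zero, Option.some.injEq] at h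
      subst h
      simp [cntF, List.set_cons_zero]
      omega
    | succ k =>
      simp only [List.getElem?_cons_succ] at h
      simp only [List.set_cons_succ, cntF, List.map_cons, List.sum_cons]
      have := ih k row row' h
      simp only [cntF] at this
      omega

theorem cntF_set2_true {vis : List (List Bool)} {i j : Int}
    (h : get2 vis i j = some false) : cntF (set2 vis i j true) + 1 = cntF vis := by
  unfold get2 set2 at *
  by_cases hij : 0 ≤ i ∧ 0 ≤ j
  · simp only [if_pos hij] at h ⊢
    cases hrow : vis[i.toNat]? with
    | none => rw [hrow] at h; simp at h
    | some row =>
      rw [hrow] at h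
      simp only [Option.bind_some] at h
      simp only [Option.getD_some]
      have h1 := cntF_set vis i.toNat row (row.set j.toNat true) hrow
      have h2 := rowSet_eq row j.toNat h
      omega
  · rw [if_neg hij] at h
    simp at h

theorem cntF_set2_le (vis : List (List Bool)) (i j : Int) :
    cntF (set2 vis i j true) ≤ cntF vis := by
  unfold set2
  split
  · cases hrow : vis[i.toNat]? with
    | none =>
      rw [List.set_eq_of_length_le]
      rw [List.getElem?_eq_none_iff] at hrow
      exact hrow
    | some row =>
      simp only [Option.getD_some]
      have h1 := cntF_set vis i.toNat row (row.set j.toNat true) hrow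
      have h2 := rowSet_le row j.toNat
      omega
  · exact le_refl _

theorem cntF_replicate (R C : Nat) :
    cntF (List.replicate R (List.replicate C false)) = R * C := by
  simp [cntF, List.map_replicate, List.sum_replicate, smul_eq_mul]


theorem stepA_shift (R C x y : Int) :
    ∀ (ds : List (Int × Int)) (g : List (List PCell)) (vis : List (List Bool))
      (rest q : List (Int × Int)),
    ds.foldl (stepA R C x y) (g, vis, rest ++ q)
      = ((ds.foldl (stepA R C x y) (g, vis, q)).1,
         (ds.foldl (stepA R C x y) (g, vis, q)).2.1,
         rest ++ (ds.foldl (stepA R C x y) (g, vis, q)).2.2) := by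
  intro ds
  induction ds with
  | nil => intro g vis rest q; rfl
  | cons dd ds ih =>
    intro g vis rest q
    simp only [List.foldl_cons, stepA]
    split_ifs with h
    · rw [List.append_assoc]
      exact ih _ _ rest _
    · exact ih _ _ rest _

theorem nbrsB_eq (p : Int × Int) :
    nbrsB p = dirsA.map (fun d => (p.1 + d.1, p.2 + d.2)) := by
  simp only [nbrsB, dirsA, List.map_cons, List.map_nil]
  norm_num
  constructor <;> omega

theorem levelB_none (o : List (List Char)) (R C : Int) :
    ∀ (fuel : Nat) (d : Int) (f : List (Int × Int)) (vis : List (List Bool)),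
    levelLoopB o none R C fuel d f vis = -1 := by
  intro fuel
  induction fuel with
  | zero => intro d f vis; rfl
  | succ n ih =>
    intro d f vis
    cases f with
    | nil => rfl
    | cons p rest =>
      simp only [levelLoopB, goalIn]
      rw [if_neg (by simp)]
      apply ih


theorem step_StI {o : List (List Char)} {C : Int} (hC : rectGrid o C)
    {v : Int} {g0 : List (List PCell)} {vis0 : List (List Bool)} {n0 : Nat}
    {x y : Int} (hx : get2 vis0 x y = some true)
    (hgx : get2 g0 x y = some (PCell.num (v - 1)))
    (sA : List (List PCell) × List (List Bool) × List (Int × Int))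
    (sB : List (List Bool) × List (Int × Int)) (d : Int × Int)
    (h : StI o v g0 vis0 n0 sA sB) :
    StI o v g0 vis0 n0 (stepA (o.length : Int) C x y sA d)
      (stepB o (o.length : Int) C sB (x + d.1, y + d.2)) := by
  obtain ⟨g, vis, qA⟩ := sA
  obtain ⟨visB, qB⟩ := sB
  unfold StI at h ⊢
  obtain ⟨hv, hq, hsg, hsv, hxa, hfr, hcnt, hpres⟩ := h
  dsimp only at hv hq hsg hsv hxa hfr hcnt hpres ⊢
  subst hv; subst hq
  obtain ⟨hvxy, hgxy⟩ := hpres x y hx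
  unfold stepA stepB
  dsimp only
  set nx := x + d.1 with hnx
  set ny := y + d.2 with hny
  have hiff : (0 ≤ nx ∧ nx < (o.length : Int) ∧ 0 ≤ ny ∧ ny < C ∧
      get2 g nx ny ≠ some (PCell.ch 'X') ∧ get2 vis nx ny ≠ some true)
      ↔ (0 ≤ nx ∧ nx < (o.length : Int) ∧ 0 ≤ ny ∧ ny < C ∧
      get2 o nx ny ≠ some 'X' ∧ get2 vis nx ny ≠ some true) := by
    constructor
    · rintro ⟨b1, b2, b3, b4, h5, h6⟩
      exact ⟨b1, b2, b3, b4, fun hcon => h5 ((hxa _ _).mpr hcon), h6⟩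
    · rintro ⟨b1, b2, b3, b4, h5, h6⟩
      exact ⟨b1, b2, b3, b4, fun hcon => h5 ((hxa _ _).mp hcon), h6⟩
  split_ifs with hA hB hB
  · -- both guards fire
    obtain ⟨b1, b2, b3, b4, h5, h6⟩ := hA
    obtain ⟨cg, hcg⟩ := get2_isSome_of hsg hC b1 b2 b3 b4
    obtain ⟨co, hco⟩ := get2_isSome_of (show shapeEq o o from rfl) hC b1 b2 b3 b4
    obtain ⟨cv, hcv⟩ := get2_isSome_of hsv hC b1 b2 b3 b4
    have hcoX : co ≠ 'X' := by
      intro hX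
      exact (hiff.mp ⟨b1, b2, b3, b4, h5, h6⟩).2.2.2.2.1 (by rw [hco, hX])
    have hcvF : cv = false := by
      cases cv
      · rfl
      · exact absurd hcv h6
    have hcell : cellVal (get2 g x y) = v - 1 := by
      rw [hgxy, hgx]; rfl
    have hwrite : cellVal (get2 g x y) + 1 = v := by rw [hcell]; ring
    refine ⟨rfl, rfl, shapeEq_set2 hsg _ _ _, shapeEq_set2 hsv _ _ _, ?_, ?_, ?_, ?_⟩
    · exact xAgree_set2_num _ hxa ⟨cg, hcg⟩ hco hcoX
    · intro p hp
      rcases List.mem_append.mp hp with hold | hnew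
      · obtain ⟨hgp, hvp⟩ := hfr p hold
        have hne : ¬(nx = p.1 ∧ ny = p.2) := by
          rintro ⟨e1, e2⟩
          exact h6 (by rw [e1, e2]; exact hvp)
        exact ⟨by rw [get2_set2_ne g _ _ _ _ _ hne]; exact hgp, get2_set2_true hvp⟩
      · simp only [List.mem_singleton] at hnew
        subst hnew
        dsimp only
        refine ⟨?_, get2_set2_self true hcv⟩
        rw [hwrite]
        exact get2_set2_self (PCell.num v) hcg
    · have := cntF_set2_true (by rw [hcv, hcvF] : get2 vis nx ny = some false)
      simp only [List.length_append, List.length_singleton]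
      omega
    · intro i j hij
      obtain ⟨hvij, hgij⟩ := hpres i j hij
      have hne : ¬(nx = i ∧ ny = j) := by
        rintro ⟨e1, e2⟩
        exact h6 (by rw [e1, e2]; exact hvij)
      exact ⟨get2_set2_true hvij, by rw [get2_set2_ne g _ _ _ _ _ hne]; exact hgij⟩
  · exact absurd (hiff.mp hA) hB
  · exact absurd (hiff.mpr hB) hA
  · exact ⟨rfl, rfl, hsg, hsv, hxa, hfr, hcnt, hpres⟩

theorem expand_StI {o : List (List Char)} {C : Int} (hC : rectGrid o C)
    {v : Int} {g0 : List (List PCell)} {vis0 : List (List Bool)} {n0 : Nat}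
    (p : Int × Int) (hx : get2 vis0 p.1 p.2 = some true)
    (hgx : get2 g0 p.1 p.2 = some (PCell.num (v - 1)))
    (sA : List (List PCell) × List (List Bool) × List (Int × Int))
    (sB : List (List Bool) × List (Int × Int))
    (h : StI o v g0 vis0 n0 sA sB) :
    StI o v g0 vis0 n0 (expandA (o.length : Int) C sA p)
      (expandB o (o.length : Int) C sB p) := by
  unfold expandA expandB
  rw [nbrsB_eq, List.foldl_map]
  induction dirsA generalizing sA sB with
  | nil => simpa using h
  | cons dd ds ih =>
    simp only [List.foldl_cons]
    exact ih _ _ (step_StI hC hx hgx sA sB dd h)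

theorem consume_level {o : List (List Char)} {C : Int} (hC : rectGrid o C)
    (target : Option (Int × Int)) (v : Int)
    (g0 : List (List PCell)) (vis0 : List (List Bool)) (n0 : Nat) :
    ∀ (f : List (Int × Int)) (fA : Nat)
      (sA : List (List PCell) × List (List Bool) × List (Int × Int))
      (sB : List (List Bool) × List (Int × Int)),
    StI o v g0 vis0 n0 sA sB →
    FrProp g0 vis0 (v - 1) f →
    (∀ gp, target = some gp → gp ∉ f) →
    bfsLoopA target (o.length : Int) C (f.length + fA) (f ++ sA.2.2) sA.1 sA.2.1
      = bfsLoopA target (o.length : Int) C fA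
          (f.foldl (expandA (o.length : Int) C) sA).2.2
          (f.foldl (expandA (o.length : Int) C) sA).1
          (f.foldl (expandA (o.length : Int) C) sA).2.1
    ∧ StI o v g0 vis0 n0 (f.foldl (expandA (o.length : Int) C) sA)
        (f.foldl (expandB o (o.length : Int) C) sB) := by
  intro f
  induction f with
  | nil =>
    intro fA sA sB h hfr hgoal
    refine ⟨by simp, by simpa using h⟩
  | cons p f' ih =>
    intro fA sA sB h hfr hgoal
    obtain ⟨g, vis, qA⟩ := sA
    obtain ⟨hgp, hvp⟩ := hfr p (List.mem_cons_self ..)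
    have hnt : ¬ some (p.1, p.2) = target := by
      intro heq
      cases target with
      | none => simp at heq
      | some gp =>
        apply hgoal gp rfl
        have : (p.1, p.2) = gp := by simpa using heq
        rw [← this]
        exact List.mem_cons_self ..
    have hfuel : f'.length + 1 + fA = (f'.length + fA) + 1 := by omega
    obtain ⟨x, y⟩ := p
    simp only [List.length_cons, List.cons_append, hfuel, bfsLoopA]
    rw [if_neg hnt]
    have hshift := stepA_shift (o.length : Int) C x y dirsA g vis f' qA
    rw [hshift]
    dsimp only
    have hstep := expand_StI hC (p := (x, y)) hvp hgp (g, vis, qA) sB h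
    have ihres := ih fA (expandA (o.length : Int) C (g, vis, qA) (x, y))
      (expandB o (o.length : Int) C sB (x, y)) hstep
      (fun q hq => hfr q (List.mem_cons_of_mem _ hq))
      (fun gp ht hm => hgoal gp ht (List.mem_cons_of_mem _ hm))
    simp only [List.foldl_cons]
    exact ihres


theorem goal_pop {o : List (List Char)} {C : Int} (hC : rectGrid o C)
    {v : Int} {g0 : List (List PCell)} {vis0 : List (List Bool)} {n0 : Nat}
    (gp : Int × Int) :
    ∀ (f : List (Int × Int)) (fuel : Nat)
      (sA : List (List PCell) × List (List Bool) × List (Int × Int))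
      (sB : List (List Bool) × List (Int × Int)),
    StI o v g0 vis0 n0 sA sB →
    FrProp g0 vis0 (v - 1) f → gp ∈ f → f.length ≤ fuel →
    (bfsLoopA (some gp) (o.length : Int) C fuel (f ++ sA.2.2) sA.1 sA.2.1).1 = v - 1
    ∧ shapeEq (bfsLoopA (some gp) (o.length : Int) C fuel (f ++ sA.2.2) sA.1 sA.2.1).2 o
    ∧ xAgree (bfsLoopA (some gp) (o.length : Int) C fuel (f ++ sA.2.2) sA.1 sA.2.1).2 o := by
  intro f
  induction f with
  | nil => intro fuel sA sB _ _ hmem _; simp at hmem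
  | cons p f' ih =>
    intro fuel sA sB h hfr hmem hlen
    obtain ⟨g, vis, qA⟩ := sA
    obtain ⟨hgp, hvp⟩ := hfr p (List.mem_cons_self ..)
    obtain ⟨hvcur, hgcur⟩ := h.2.2.2.2.2.2.2 p.1 p.2 hvp
    cases fuel with
    | zero => simp at hlen
    | succ m =>
      obtain ⟨x, y⟩ := p
      simp only [List.cons_append, bfsLoopA]
      by_cases hpg : ((x, y) : Int × Int) = gp
      · rw [if_pos (by rw [hpg])]
        dsimp only
        refine ⟨?_, h.2.2.1, h.2.2.2.2.1⟩
        rw [hgcur, hgp]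
        rfl
      · rw [if_neg (by simpa using hpg)]
        have hshift := stepA_shift (o.length : Int) C x y dirsA g vis f' qA
        rw [hshift]
        dsimp only
        have hstep := expand_StI hC (p := (x, y)) hvp hgp (g, vis, qA) sB h
        have hmem' : gp ∈ f' := by
          rcases List.mem_cons.mp hmem with h1 | h2
          · exact absurd h1.symm hpg
          · exact h2
        exact ih m (expandA (o.length : Int) C (g, vis, qA) (x, y))
          (expandB o (o.length : Int) C sB (x, y)) hstep
          (fun q hq => hfr q (List.mem_cons_of_mem _ hq)) hmem'
          (by simpa using Nat.le_of_succ_le_succ hlen)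

theorem simL {o : List (List Char)} {C : Int} (hC : rectGrid o C) (move : Int)
    (target : Option (Int × Int)) :
    ∀ (fuelB : Nat) (d : Int) (f : List (Int × Int)) (g : List (List PCell))
      (vis : List (List Bool)) (fA : Nat),
    0 ≤ d → shapeEq g o → shapeEq vis o → xAgree g o →
    FrProp g vis (d + move) f →
    cntF vis + f.length ≤ fA → cntF vis + f.length ≤ fuelB →
    ((bfsLoopA target (o.length : Int) C fA f g vis).1
      = (if levelLoopB o target (o.length : Int) C fuelB d f vis = -1 then -1
         else levelLoopB o target (o.length : Int) C fuelB d f vis + move))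
    ∧ shapeEq (bfsLoopA target (o.length : Int) C fA f g vis).2 o
    ∧ xAgree (bfsLoopA target (o.length : Int) C fA f g vis).2 o := by
  intro fuelB
  induction fuelB with
  | zero =>
    intro d f g vis fA hd hsg hsv hxa hfr hfa hfb
    have hf : f = [] := by
      cases f with
      | nil => rfl
      | cons p f' => simp at hfb
    subst hf
    cases fA with
    | zero => exact ⟨by simp [bfsLoopA, levelLoopB], hsg, hxa⟩
    | succ m => exact ⟨by simp [bfsLoopA, levelLoopB], hsg, hxa⟩
  | succ fuel ihB =>
    intro d f g vis fA hd hsg hsv hxa hfr hfa hfb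
    cases f with
    | nil =>
      cases fA with
      | zero => exact ⟨by simp [bfsLoopA, levelLoopB], hsg, hxa⟩
      | succ m => exact ⟨by simp [bfsLoopA, levelLoopB], hsg, hxa⟩
    | cons p f' =>
      have hSt0 : StI o (d + move + 1) g vis 0 (g, vis, []) (vis, []) :=
        ⟨rfl, rfl, hsg, hsv, hxa, fun q hq => by simp at hq, by simp,
         fun i j hij => ⟨hij, rfl⟩⟩
      have hfr' : FrProp g vis (d + move + 1 - 1) (p :: f') := by
        simpa using hfr
      by_cases hgl : goalIn target (p :: f') = true
      · obtain ⟨gpv, htv, hmem⟩ : ∃ gpv, target = some gpv ∧ gpv ∈ p :: f' := by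
          cases target with
          | none => simp [goalIn] at hgl
          | some gpv =>
            refine ⟨gpv, rfl, ?_⟩
            simpa [goalIn] using hgl
        subst htv
        have hfA : (p :: f').length ≤ fA := by omega
        have hpop := goal_pop hC gpv (p :: f') fA (g, vis, []) (vis, []) hSt0 hfr' hmem hfA
        simp only [List.append_nil] at hpop
        have hB : levelLoopB o (some gpv) (o.length : Int) C (fuel + 1) d (p :: f') vis
            = d := by
          simp only [levelLoopB]
          rw [if_pos hgl]
        rw [hB]
        rw [if_neg (by omega : ¬ d = (-1 : Int))]
        refine ⟨?_, hpop.2.1, hpop.2.2⟩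
        rw [hpop.1]
        ring
      · have hgoal : ∀ gq, target = some gq → gq ∉ p :: f' := by
          intro gq ht hm
          subst ht
          simp [goalIn] at hgl
          rcases List.mem_cons.mp hm with h1 | h2
          · exact hgl.1 h1
          · exact hgl.2 h2
        have hfA : fA = (p :: f').length + (fA - (p :: f').length) := by omega
        have hcons := consume_level hC target (d + move + 1) g vis 0 (p :: f')
          (fA - (p :: f').length) (g, vis, []) (vis, []) hSt0 hfr' hgoal
        simp only [List.append_nil] at hcons
        obtain ⟨hloop, hStE⟩ := hcons
        set E := (p :: f').foldl (expandA (o.length : Int) C) (g, vis, []) with hE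
        set F := (p :: f').foldl (expandB o (o.length : Int) C) (vis, []) with hF
        have hB : levelLoopB o target (o.length : Int) C (fuel + 1) d (p :: f') vis
            = levelLoopB o target (o.length : Int) C fuel (d + 1) F.2 F.1 := by
          simp only [levelLoopB]
          rw [if_neg (by simp [hgl])]
        obtain ⟨hv, hq, hsgE, hsvE, hxaE, hfrE, hcntE, hpresE⟩ := hStE
        have hfrE' : FrProp E.1 E.2.1 (d + 1 + move) E.2.2 := by
          have : d + 1 + move = d + move + 1 := by ring
          rw [this]
          exact hfrE
        have hcnt' : cntF E.2.1 + E.2.2.length = cntF vis := by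
          simpa using hcntE
        have hfa2 : cntF E.2.1 + E.2.2.length ≤ fA - (p :: f').length := by
          simp only [List.length_cons] at hfa ⊢
          omega
        have hfb2 : cntF E.2.1 + E.2.2.length ≤ fuel := by
          simp only [List.length_cons] at hfb
          omega
        have hih := ihB (d + 1) E.2.2 E.1 E.2.1 (fA - (p :: f').length) (by omega)
          hsgE hsvE hxaE hfrE' hfa2 hfb2
        rw [hB, ← hv, ← hq]
        rw [hfA, hloop]
        exact hih


theorem solution_eq (maps : List String) (hpre : Pre_solution maps) :
    solution maps = solution_alt maps := by
  obtain ⟨hrect0, -⟩ := hpre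
  simp only [solution, solution_alt]
  set o := maps.map (fun s => s.toList) with ho
  have harr : maps.map (fun s => s.toList.map PCell.ch) = o.map (List.map PCell.ch) := by
    rw [ho, List.map_map]
    rfl
  have hohead : o.headI = (maps.headI).toList := by
    cases maps with
    | nil => rfl
    | cons a as => rfl
  have hrectC : rectGrid o ((o.headI).length : Int) := by
    intro row hrow
    rw [ho] at hrow
    rw [List.mem_map] at hrow
    obtain ⟨s, hs, rfl⟩ := hrow
    rw [hohead]
    exact_mod_cast hrect0 s hs
  have hlen2 : (o.map (List.map PCell.ch)).length = o.length := by simp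
  have hhead2 : ((o.map (List.map PCell.ch)).headI).length = (o.headI).length := by
    cases o with
    | nil => rfl
    | cons a as => simp
  simp only [harr, ← findB_eq, bfsA, distB, hlen2, hhead2]
  cases hfS : findB o 'S' with
  | none => rfl
  | some s =>
    dsimp only
    have hfS' : findA (o.map (List.map PCell.ch)) (PCell.ch 'S') 0 = some s := by
      rw [← findB_eq]; exact hfS
    have hSg : get2 (o.map (List.map PCell.ch)) s.1 s.2 = some (PCell.ch 'S') :=
      findA_sound _ hfS'
    have hSo : get2 o s.1 s.2 = some 'S' := by
      have hm := get2_map PCell.ch o s.1 s.2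
      rw [hSg] at hm
      cases hoo : get2 o s.1 s.2 with
      | none => rw [hoo] at hm; simp at hm
      | some a =>
        rw [hoo] at hm
        simp only [Option.map_some, Option.some.injEq, PCell.ch.injEq] at hm
        rw [← hm]
    have hshape_arr : shapeEq (o.map (List.map PCell.ch)) o := by
      unfold shapeEq
      rw [List.map_map]
      simp [Function.comp_def]
    have hbounds := bounds_of_get2_some hSo (show shapeEq o o from rfl) hrectC
    have hshape_vis : shapeEq (List.replicate o.length
        (List.replicate (o.headI).length false)) o :=
      shapeEq_replicate o _ (fun row hrow => by exact_mod_cast hrectC row hrow)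
    obtain ⟨w0, hw0⟩ := get2_isSome_of hshape_vis hrectC hbounds.1 hbounds.2.1
      hbounds.2.2.1 hbounds.2.2.2
    have hfr1 : FrProp (set2 (o.map (List.map PCell.ch)) s.1 s.2 (PCell.num 0))
        (set2 (List.replicate o.length (List.replicate (o.headI).length false))
          s.1 s.2 true) (0 + 0) [s] := by
      intro p hp
      simp only [List.mem_singleton] at hp
      subst hp
      refine ⟨?_, get2_set2_self true hw0⟩
      rw [get2_set2_self (PCell.num 0) hSg]
      norm_num
    have hcnt1 : cntF (set2 (List.replicate o.length
          (List.replicate (o.headI).length false)) s.1 s.2 true)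
        + ([s] : List (Int × Int)).length ≤ o.length * (o.headI).length + 1 := by
      have h1 := cntF_set2_le (List.replicate o.length
        (List.replicate (o.headI).length false)) s.1 s.2
      have h2 := cntF_replicate o.length (o.headI).length
      simp only [List.length_singleton]
      omega
    have hsim1 := simL hrectC 0 (findB o 'L') (o.length * (o.headI).length + 1) 0 [s]
      (set2 (o.map (List.map PCell.ch)) s.1 s.2 (PCell.num 0))
      (set2 (List.replicate o.length (List.replicate (o.headI).length false)) s.1 s.2 true)
      (o.length * (o.headI).length + 1) (le_refl 0)
      (shapeEq_set2 hshape_arr _ _ _) (shapeEq_set2 hshape_vis _ _ _)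
      (xAgree_set2_num 0 (xAgree_base o) ⟨_, hSg⟩ hSo (by decide)) hfr1 hcnt1 hcnt1
    obtain ⟨h1, hsg1, hxa1⟩ := hsim1
    set d1 := levelLoopB o (findB o 'L') (o.length : Int) ((o.headI).length : Int)
      (o.length * (o.headI).length + 1) 0 [s]
      (set2 (List.replicate o.length (List.replicate (o.headI).length false)) s.1 s.2 true)
      with hd1def
    by_cases hd1 : d1 = -1
    · have hA1 : (bfsLoopA (findB o 'L') (o.length : Int) ((o.headI).length : Int)
          (o.length * (o.headI).length + 1) [s]
          (set2 (o.map (List.map PCell.ch)) s.1 s.2 (PCell.num 0))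
          (set2 (List.replicate o.length (List.replicate (o.headI).length false))
            s.1 s.2 true)).1 = -1 := by
        rw [h1, if_pos hd1]
      rw [hA1, if_pos rfl, if_pos hd1]
    · have hA1 : (bfsLoopA (findB o 'L') (o.length : Int) ((o.headI).length : Int)
          (o.length * (o.headI).length + 1) [s]
          (set2 (o.map (List.map PCell.ch)) s.1 s.2 (PCell.num 0))
          (set2 (List.replicate o.length (List.replicate (o.headI).length false))
            s.1 s.2 true)).1 = d1 := by
        rw [h1, if_neg hd1, add_zero]
      rw [hA1, if_neg hd1, if_neg hd1]
      cases hfL : findB o 'L' with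
      | none =>
        exfalso
        apply hd1
        rw [hd1def, hfL]
        exact levelB_none o _ _ _ _ _ _
      | some lp =>
        dsimp only
        rw [hfL] at hsg1 hxa1
        have hg1len := shapeEq_length hsg1
        have hg1head := shapeEq_headI hsg1
        rw [hg1len, hg1head]
        have hfL' : findA (o.map (List.map PCell.ch)) (PCell.ch 'L') 0 = some lp := by
          rw [← findB_eq]; exact hfL
        have hLg : get2 (o.map (List.map PCell.ch)) lp.1 lp.2 = some (PCell.ch 'L') :=
          findA_sound _ hfL'
        have hLo : get2 o lp.1 lp.2 = some 'L' := by
          have hm := get2_map PCell.ch o lp.1 lp.2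
          rw [hLg] at hm
          cases hoo : get2 o lp.1 lp.2 with
          | none => rw [hoo] at hm; simp at hm
          | some a =>
            rw [hoo] at hm
            simp only [Option.map_some, Option.some.injEq, PCell.ch.injEq] at hm
            rw [← hm]
        have hboundsL := bounds_of_get2_some hLo (show shapeEq o o from rfl) hrectC
        obtain ⟨w1, hw1⟩ := get2_isSome_of hsg1 hrectC hboundsL.1 hboundsL.2.1
          hboundsL.2.2.1 hboundsL.2.2.2
        obtain ⟨w2, hw2⟩ := get2_isSome_of hshape_vis hrectC hboundsL.1 hboundsL.2.1
          hboundsL.2.2.1 hboundsL.2.2.2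
        have hfr2 : FrProp (set2 (bfsLoopA (some lp) (o.length : Int)
              ((o.headI).length : Int) (o.length * (o.headI).length + 1) [s]
              (set2 (o.map (List.map PCell.ch)) s.1 s.2 (PCell.num 0))
              (set2 (List.replicate o.length (List.replicate (o.headI).length false))
                s.1 s.2 true)).2 lp.1 lp.2 (PCell.num d1))
            (set2 (List.replicate o.length (List.replicate (o.headI).length false))
              lp.1 lp.2 true) (0 + d1) [lp] := by
          intro p hp
          simp only [List.mem_singleton] at hp
          subst hp
          refine ⟨?_, get2_set2_self true hw2⟩
          rw [get2_set2_self (PCell.num d1) hw1]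
          norm_num
        have hcnt2 : cntF (set2 (List.replicate o.length
              (List.replicate (o.headI).length false)) lp.1 lp.2 true)
            + ([lp] : List (Int × Int)).length ≤ o.length * (o.headI).length + 1 := by
          have h1 := cntF_set2_le (List.replicate o.length
            (List.replicate (o.headI).length false)) lp.1 lp.2
          have h2 := cntF_replicate o.length (o.headI).length
          simp only [List.length_singleton]
          omega
        have hsim2 := simL hrectC d1 (findB o 'E') (o.length * (o.headI).length + 1) 0 [lp]
          (set2 (bfsLoopA (some lp) (o.length : Int) ((o.headI).length : Int)
              (o.length * (o.headI).length + 1) [s]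
              (set2 (o.map (List.map PCell.ch)) s.1 s.2 (PCell.num 0))
              (set2 (List.replicate o.length (List.replicate (o.headI).length false))
                s.1 s.2 true)).2 lp.1 lp.2 (PCell.num d1))
          (set2 (List.replicate o.length (List.replicate (o.headI).length false))
            lp.1 lp.2 true)
          (o.length * (o.headI).length + 1) (le_refl 0)
          (shapeEq_set2 hsg1 _ _ _) (shapeEq_set2 hshape_vis _ _ _)
          (xAgree_set2_num d1 hxa1 ⟨_, hw1⟩ hLo (by decide)) hfr2 hcnt2 hcnt2
        obtain ⟨h2, -, -⟩ := hsim2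
        rw [h2]
        set d2 := levelLoopB o (findB o 'E') (o.length : Int) ((o.headI).length : Int)
          (o.length * (o.headI).length + 1) 0 [lp]
          (set2 (List.replicate o.length (List.replicate (o.headI).length false))
            lp.1 lp.2 true) with hd2def
        by_cases hd2 : d2 = -1
        · rw [if_pos hd2, if_pos hd2]
        · rw [if_neg hd2, if_neg hd2]
          omega

-- ===== VERDICT (by name: the statement is the Claim_ definition above) =====
theorem solution_spec : Claim_equal_solution := by
  intro maps _ hpre
  exact solution_eq maps hpre
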